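-- pv_equiv track=rewrite | github.com/KyongBeom/baekjoon | 프로그래머스/0/181834. l로 만들기/l로 만들기.py | solution
-- ===== SOURCE A (Python) =====
-- def solution(my):
--     answer = ''
--     for i in my:
--         if ord(i) < ord("l"):
--             answer += "l"
--         else:
--             answer += i
--     return answer
-- ===== SOURCE B (Python) =====
-- def solution(my):
--     # Run-based: split the string into maximal runs of "low" (< 'l') and
--     # "high" (>= 'l') characters; emit 'l' * runlength for low runs and the
--     # run itself (an unchanged slice) for high runs; join once at the end.
--     parts = []
--     i = 0
--     n = len(my)
--     while i < n:
--         j = i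
--         if my[i] < 'l':
--             while j < n and my[j] < 'l':
--                 j += 1
--             parts.append('l' * (j - i))
--         else:
--             while j < n and my[j] >= 'l':
--                 j += 1
--             parts.append(my[i:j])
--         i = j
--     return ''.join(parts)
-- ===== Notes on version B (the rewrite author's own statement) =====
-- stated objective: alternative
-- what changed: Instead of a per-character if/else with string concatenation, B scans the string as maximal runs of below-'l' / at-least-'l' characters with a two-index while loop, emitting 'l'*runlength or the unchanged slice per run, joined once at the end.
import Mathlib
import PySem

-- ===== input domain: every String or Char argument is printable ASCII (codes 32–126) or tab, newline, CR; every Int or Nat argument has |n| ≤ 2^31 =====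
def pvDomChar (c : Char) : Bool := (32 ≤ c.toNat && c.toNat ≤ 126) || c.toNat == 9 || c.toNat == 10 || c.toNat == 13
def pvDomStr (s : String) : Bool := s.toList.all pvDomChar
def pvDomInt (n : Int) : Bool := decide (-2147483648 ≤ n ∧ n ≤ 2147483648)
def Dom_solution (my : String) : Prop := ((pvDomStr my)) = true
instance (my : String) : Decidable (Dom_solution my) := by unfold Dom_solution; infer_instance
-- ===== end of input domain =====

-- B replaces A's per-character if/else concatenation loop by a run-based scan:
-- maximal runs of below-'l' / at-least-'l' characters, emitted per run and joined once.

-- ===== PORT A =====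
-- for i in my: answer += "l" if ord(i) < ord("l") else i
def solution (my : String) : String :=
  String.mk (my.toList.foldl
    (fun answer i => if i.toNat < 108 then answer ++ ['l'] else answer ++ [i]) [])

-- ===== PORT B =====
-- the inner 'while j < n and <pred>(my[j]): j += 1' loops: length of the leading
-- run of the suffix satisfying the predicate (exact: j - i is this count)
def runLen (p : Char → Bool) : List Char → Nat
  | [] => 0
  | c :: cs => if p c then 1 + runLen p cs else 0

-- the outer 'while i < n' loop: one step per run, advancing past the run
def runGo (cs : List Char) : List (List Char) :=
  match h : cs with
  | [] => []
  | c :: rest =>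
    if hc : c.toNat < 108 then
      let k := 1 + runLen (fun x => x.toNat < 108) rest   -- parts.append('l' * (j - i))
      List.replicate k 'l' :: runGo (cs.drop k)
    else
      let k := 1 + runLen (fun x => ¬ x.toNat < 108) rest -- parts.append(my[i:j])
      cs.take k :: runGo (cs.drop k)
  termination_by cs.length
  decreasing_by
  · simp [h]
  · simp [h]

def solution_alt (my : String) : String :=
  String.mk (runGo my.toList).flatten  -- ''.join(parts)

-- ===== PRECONDITION & SPEC =====
def Spec_solution (my : String) (out : String) : Prop := out = solution_alt my
instance (my : String) (out : String) : Decidable (Spec_solution my out) := by unfold Spec_solution; infer_instance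

-- ===== CLAIM (what is proved, stated in full; the proofs are below) =====
def Claim_equal_solution : Prop := ∀ (my : String), Dom_solution my → Spec_solution my (solution my)

-- ===== LEMMAS AND PROOFS =====

theorem runLen_le (p : Char → Bool) (cs : List Char) : runLen p cs ≤ cs.length := by
  induction cs with
  | nil => simp [runLen]
  | cons c cs ih => simp only [runLen, List.length_cons]; split <;> omega

def fA (c : Char) : Char := if c.toNat < 108 then 'l' else c

theorem runLen_take_map_true (cs : List Char) :
    (cs.take (runLen (fun x => x.toNat < 108) cs)).map fA
      = List.replicate (runLen (fun x => x.toNat < 108) cs) 'l' := by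
  induction cs with
  | nil => simp [runLen]
  | cons c cs ih =>
    by_cases hc : c.toNat < 108
    · have h1 : runLen (fun x => x.toNat < 108) (c :: cs)
          = runLen (fun x => x.toNat < 108) cs + 1 := by simp [runLen, hc]; omega
      rw [h1, List.take_succ_cons, List.map_cons, ih, List.replicate_succ,
        show fA c = 'l' from by simp [fA, hc]]
    · simp [runLen, hc]

theorem runLen_take_map_false (cs : List Char) :
    (cs.take (runLen (fun x => ¬ x.toNat < 108) cs)).map fA
      = cs.take (runLen (fun x => ¬ x.toNat < 108) cs) := by
  induction cs with
  | nil => simp [runLen]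
  | cons c cs ih =>
    by_cases hc : c.toNat < 108
    · simp [runLen, hc]
    · have h1 : runLen (fun x => ¬ x.toNat < 108) (c :: cs)
          = runLen (fun x => ¬ x.toNat < 108) cs + 1 := by simp [runLen, hc]; omega
      rw [h1, List.take_succ_cons, List.map_cons, ih, show fA c = c from by simp [fA, hc]]

theorem runGo_flatten (cs : List Char) : (runGo cs).flatten = cs.map fA := by
  induction hn : cs.length using Nat.strong_induction_on generalizing cs with
  | _ n ih =>
    match cs, hn with
    | [], _ => simp [runGo]
    | c :: rest, hn =>
      rw [runGo]
      by_cases hc : c.toNat < 108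
      · simp only [dif_pos hc, List.flatten_cons]
        have hk := runLen_le (fun x => x.toNat < 108) rest
        rw [ih _ (by simp only [← hn, List.length_drop, List.length_cons]; omega) _ rfl]
        have : (c :: rest).map fA
            = ((c :: rest).take (1 + runLen (fun x => x.toNat < 108) rest)).map fA
              ++ ((c :: rest).drop (1 + runLen (fun x => x.toNat < 108) rest)).map fA := by
          rw [← List.map_append, List.take_append_drop]
        rw [this]
        congr 1
        rw [show (1 + runLen (fun x => x.toNat < 108) rest) = (runLen (fun x => x.toNat < 108) rest) + 1 by omega]
        simp only [List.take_succ_cons, List.map_cons, List.replicate_succ]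
        rw [show fA c = 'l' by simp [fA, hc]]
        rw [runLen_take_map_true]
      · simp only [dif_neg hc, List.flatten_cons]
        have hk := runLen_le (fun x => ¬ x.toNat < 108) rest
        rw [ih _ (by simp only [← hn, List.length_drop, List.length_cons]; omega) _ rfl]
        have : (c :: rest).map fA
            = ((c :: rest).take (1 + runLen (fun x => ¬ x.toNat < 108) rest)).map fA
              ++ ((c :: rest).drop (1 + runLen (fun x => ¬ x.toNat < 108) rest)).map fA := by
          rw [← List.map_append, List.take_append_drop]
        rw [this]
        congr 1
        rw [show (1 + runLen (fun x => ¬ x.toNat < 108) rest) = (runLen (fun x => ¬ x.toNat < 108) rest) + 1 by omega]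
        simp only [List.take_succ_cons, List.map_cons]
        rw [show fA c = c by simp [fA, hc]]
        rw [runLen_take_map_false]

-- ===== VERDICT (by name: the statement is the Claim_ definition above) =====
theorem solution_spec : Claim_equal_solution := by
  intro my _
  unfold Spec_solution solution solution_alt
  rw [runGo_flatten]
  refine congrArg String.mk ?_
  rw [PySem.List.foldl_congr_mem (l := my.toList) (init := ([] : List Char))
        (f := fun answer i => if i.toNat < 108 then answer ++ ['l'] else answer ++ [i])
        (g := fun answer i => answer ++ [fA i])
        (fun acc x _ => by dsimp only; unfold fA; split <;> rfl),
      PySem.List.foldl_append_singleton_eq_map, List.nil_append]
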